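-- pv_equiv track=rewrite | github.com/adiprasetyohermawan/05-CML-UseCase | Training Project Customer Segmentation/Scripts/predict_flask.py | dob_encode
-- ===== SOURCE A (Python) =====
-- def dob_encode(dob):
--     age_range_mapping = {
--         (19, 22): '19 - 22', (23, 26): '23 - 26', (27, 30): '27 - 30',
--         (31, 34): '31 - 34', (35, 38): '35 - 38', (39, 42): '39 - 42',
--         (43, 46): '43 - 46', (47, 50): '47 - 50', (51, 54): '51 - 54'
--     }
--     age_mapping = {
--         '19 - 22': 1, '23 - 26': 2, '27 - 30': 3,
--         '31 - 34': 4, '35 - 38': 5, '39 - 42': 6,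
--         '43 - 46': 7, '47 - 50': 8, '51 - 54': 9
--     }
--
--     # Find the correct age range
--     for age_range, label in age_range_mapping.items():
--         if age_range[0] <= dob <= age_range[1]:
--             # Return the encoded integer for the age range
--             return age_mapping.get(label, 0)
--
--     # Return 0 if dob doesn't fall within any defined range
--     return 0
-- ===== SOURCE B (Python) =====
-- def dob_encode(dob):
--     # Closed form: integer ages 19..54 fall into 4-wide bands starting at 19.
--     if 19 <= dob <= 54:
--         return (dob - 19) // 4 + 1
--     return 0
-- ===== Notes on version B (the rewrite author's own statement) =====
-- stated objective: simpler
-- what changed: Replaced the dict-of-ranges scan plus label lookup with one closed-form arithmetic expression ((dob-19)//4 + 1) guarded by a single range check.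
import Mathlib
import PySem

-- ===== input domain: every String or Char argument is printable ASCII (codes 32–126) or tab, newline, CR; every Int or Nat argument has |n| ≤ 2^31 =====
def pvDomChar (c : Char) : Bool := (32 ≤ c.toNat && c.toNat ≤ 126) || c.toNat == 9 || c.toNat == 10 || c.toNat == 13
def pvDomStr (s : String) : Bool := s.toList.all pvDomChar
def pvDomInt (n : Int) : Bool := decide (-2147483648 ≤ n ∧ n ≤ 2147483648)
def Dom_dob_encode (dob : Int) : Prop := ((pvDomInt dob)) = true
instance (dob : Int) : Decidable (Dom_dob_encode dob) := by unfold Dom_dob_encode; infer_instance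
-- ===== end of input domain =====

-- B replaces A's scan over a dict of ranges and a label lookup by one closed-form
-- arithmetic expression with a single range guard (objective: simpler).

-- ===== PORT A =====
-- the dict of ranges, in insertion order, as an association list
def dobRanges : List ((Int × Int) × String) :=
  [((19, 22), "19 - 22"), ((23, 26), "23 - 26"), ((27, 30), "27 - 30"),
   ((31, 34), "31 - 34"), ((35, 38), "35 - 38"), ((39, 42), "39 - 42"),
   ((43, 46), "43 - 46"), ((47, 50), "47 - 50"), ((51, 54), "51 - 54")]

def dobAgeMapping : PySem.Dict String Int :=
  PySem.Dict.ofList [("19 - 22", 1), ("23 - 26", 2), ("27 - 30", 3),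
   ("31 - 34", 4), ("35 - 38", 5), ("39 - 42", 6),
   ("43 - 46", 7), ("47 - 50", 8), ("51 - 54", 9)]

-- the for-loop with early return
def dobLoop (dob : Int) : List ((Int × Int) × String) → Int
  | [] => 0
  | (r, label) :: rest =>
      if r.1 ≤ dob ∧ dob ≤ r.2 then PySem.Dict.getD dobAgeMapping label 0
      else dobLoop dob rest

def dob_encode (dob : Int) : Int := dobLoop dob dobRanges

-- ===== PORT B =====
def dob_encode_alt (dob : Int) : Int :=
  if 19 ≤ dob ∧ dob ≤ 54 then PySem.Int.floordiv (dob - 19) 4 + 1 else 0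

-- ===== PRECONDITION & SPEC =====
def Spec_dob_encode (dob : Int) (out : Int) : Prop := out = dob_encode_alt dob
instance (dob : Int) (out : Int) : Decidable (Spec_dob_encode dob out) := by unfold Spec_dob_encode; infer_instance

-- ===== CLAIM (what is proved, stated in full; the proofs are below) =====
def Claim_equal_dob_encode : Prop := ∀ (dob : Int), Dom_dob_encode dob → Spec_dob_encode dob (dob_encode dob)

-- ===== LEMMAS AND PROOFS =====

-- ===== VERDICT (by name: the statement is the Claim_ definition above) =====
theorem dob_encode_spec : Claim_equal_dob_encode := by
  intro dob _
  unfold Spec_dob_encode dob_encode dob_encode_alt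
  have e1 : PySem.Dict.getD dobAgeMapping "19 - 22" 0 = 1 := by decide
  have e2 : PySem.Dict.getD dobAgeMapping "23 - 26" 0 = 2 := by decide
  have e3 : PySem.Dict.getD dobAgeMapping "27 - 30" 0 = 3 := by decide
  have e4 : PySem.Dict.getD dobAgeMapping "31 - 34" 0 = 4 := by decide
  have e5 : PySem.Dict.getD dobAgeMapping "35 - 38" 0 = 5 := by decide
  have e6 : PySem.Dict.getD dobAgeMapping "39 - 42" 0 = 6 := by decide
  have e7 : PySem.Dict.getD dobAgeMapping "43 - 46" 0 = 7 := by decide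
  have e8 : PySem.Dict.getD dobAgeMapping "47 - 50" 0 = 8 := by decide
  have e9 : PySem.Dict.getD dobAgeMapping "51 - 54" 0 = 9 := by decide
  rw [PySem.Int.floordiv_eq_ediv_of_pos (by norm_num)]
  simp only [dobRanges, dobLoop, e1, e2, e3, e4, e5, e6, e7, e8, e9]
  split_ifs <;> omega
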